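-- pv_equiv track=rewrite | github.com/ChenDaiwei-99/compositional-something | core/multiplication_pipeline_pseudo_addition.py | cot_target_length_upper_bound
-- ===== SOURCE A (Python) =====
-- def cot_target_length_upper_bound(digits_n: int, digits_m: int) -> int:
--     """Worst-case character length of the schoolbook CoT chain for an E_{n,m} example.
--
--     Mirrors `MultiplicationExample.target_w_base_predictions`: decomposes along
--     the shorter dimension into k = min(n, m) components; component i contributes
--     `pred_i * 10^(k-1-i)` where pred_i is at most max(n, m) + 1 digits (since
--     (10^L - 1) * 9 has L+1 digits). Returns 0 when CoT is not emitted (a side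
--     < 2 digits), so the plain-target length governs in that case.
--     """
--     if digits_n < 2 or digits_m < 2:
--         return 0
--     k = min(digits_n, digits_m)
--     long_side = max(digits_n, digits_m)
--     term_chars = sum((long_side + 1) + (k - 1 - i) for i in range(k))
--     sep_chars = 3 * (k - 1) + 3  # " + " between terms, plus " = " before final
--     final_chars = digits_n + digits_m  # a*b has at most n + m digits
--     return term_chars + sep_chars + final_chars
-- ===== SOURCE B (Python) =====
-- def cot_target_length_upper_bound(digits_n: int, digits_m: int) -> int:
--     if digits_n < 2 or digits_m < 2:
--         return 0
--     # Since min*max == digits_n*digits_m, the whole sum collapses to one formula: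
--     # n*m + n + m + k*(k+7)//2, with k = the shorter side.
--     k = digits_n if digits_n <= digits_m else digits_m
--     return digits_n * digits_m + digits_n + digits_m + k * (k + 7) // 2
-- ===== Notes on version B (the rewrite author's own statement) =====
-- stated objective: faster
-- what changed: Replaced the O(k) arithmetic-series loop (and the min/max decomposition) with the single closed form n*m + n + m + k*(k+7)//2, using the identity min*max = n*m to eliminate long_side entirely.
import Mathlib
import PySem

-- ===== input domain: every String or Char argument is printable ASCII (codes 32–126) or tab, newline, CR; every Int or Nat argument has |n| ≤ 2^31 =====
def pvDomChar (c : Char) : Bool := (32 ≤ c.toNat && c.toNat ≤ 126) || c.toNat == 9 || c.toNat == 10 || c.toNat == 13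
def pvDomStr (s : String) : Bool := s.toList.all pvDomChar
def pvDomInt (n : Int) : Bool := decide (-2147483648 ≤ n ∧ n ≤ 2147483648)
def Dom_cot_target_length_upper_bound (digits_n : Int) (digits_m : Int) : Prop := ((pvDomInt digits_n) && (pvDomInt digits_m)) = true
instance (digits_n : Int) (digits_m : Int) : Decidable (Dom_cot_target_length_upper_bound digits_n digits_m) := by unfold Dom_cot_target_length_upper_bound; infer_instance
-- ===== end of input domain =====

-- ===== PORT A =====
-- B replaces A's O(k) series loop and min/max decomposition with the single
-- closed form n*m + n + m + k*(k+7)//2 (objective: faster).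
def cot_target_length_upper_bound (digits_n : Int) (digits_m : Int) : Int :=
  if digits_n < 2 ∨ digits_m < 2 then 0
  else
    let k := min digits_n digits_m
    let long_side := max digits_n digits_m
    let term_chars := (PySem.List.pyRange 0 k 1).foldl
      (fun acc i => acc + ((long_side + 1) + (k - 1 - i))) 0
    let sep_chars := 3 * (k - 1) + 3
    let final_chars := digits_n + digits_m
    term_chars + sep_chars + final_chars

-- ===== PORT B =====
def cot_target_length_upper_bound_alt (digits_n : Int) (digits_m : Int) : Int :=
  if digits_n < 2 ∨ digits_m < 2 then 0
  else
    let k := if digits_n ≤ digits_m then digits_n else digits_m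
    digits_n * digits_m + digits_n + digits_m + PySem.Int.floordiv (k * (k + 7)) 2

-- ===== PRECONDITION & SPEC =====
def Spec_cot_target_length_upper_bound (digits_n : Int) (digits_m : Int) (out : Int) : Prop := out = cot_target_length_upper_bound_alt digits_n digits_m
instance (digits_n : Int) (digits_m : Int) (out : Int) : Decidable (Spec_cot_target_length_upper_bound digits_n digits_m out) := by unfold Spec_cot_target_length_upper_bound; infer_instance

-- ===== CLAIM (what is proved, stated in full; the proofs are below) =====
def Claim_equal_cot_target_length_upper_bound : Prop := ∀ (digits_n : Int) (digits_m : Int), Dom_cot_target_length_upper_bound digits_n digits_m → Spec_cot_target_length_upper_bound digits_n digits_m (cot_target_length_upper_bound digits_n digits_m)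

-- ===== LEMMAS AND PROOFS =====
-- 2 * (fold of the series) = 2*s + 2*(n*c) - n*(n-1), avoiding division in the induction
theorem pv_series_fold (c : Int) : ∀ (n : Nat) (s : Int),
    2 * (PySem.List.pyRange 0 (n : Int) 1).foldl (fun acc i => acc + (c - i)) s
      = 2 * s + 2 * ((n : Int) * c) - (n : Int) * ((n : Int) - 1) := by
  intro n
  induction n with
  | zero =>
    intro s
    rw [show ((0 : Nat) : Int) = 0 from rfl, PySem.List.pyRange_one_eq_nil (le_refl 0)]
    simp
  | succ n ih =>
    intro s
    have h : PySem.List.pyRange 0 ((n + 1 : Nat) : Int) 1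
        = PySem.List.pyRange 0 (n : Int) 1 ++ [(n : Int)] := by
      push_cast
      exact PySem.List.pyRange_one_succ_right (by positivity)
    rw [h, List.foldl_append]
    simp only [List.foldl]
    have := ih s
    push_cast
    push_cast at this
    linarith

-- ===== VERDICT (by name: the statement is the Claim_ definition above) =====
theorem cot_target_length_upper_bound_spec : Claim_equal_cot_target_length_upper_bound := by
  intro n m _
  unfold Spec_cot_target_length_upper_bound cot_target_length_upper_bound cot_target_length_upper_bound_alt
  by_cases hb : n < 2 ∨ m < 2
  · rw [if_pos hb, if_pos hb]
  · rw [if_neg hb, if_neg hb]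
    dsimp only
    push_neg at hb
    set k := min n m with hk
    set L := max n m with hL
    have hk2 : 2 ≤ k := le_min hb.1 hb.2
    have hkB : (if n ≤ m then n else m) = k := by
      rw [hk]; rcases le_total n m with h | h <;> simp [min_def, h] <;> omega
    rw [hkB]
    have hmul : k * L = n * m := by
      rw [hk, hL]; rcases le_total n m with h | h <;> simp [min_def, max_def, h] <;> ring
    obtain ⟨kn, hkn⟩ : ∃ kn : Nat, k = (kn : Int) :=
      ⟨k.toNat, (Int.toNat_of_nonneg (by omega)).symm⟩
    have hfold := pv_series_fold (L + k) kn 0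
    rw [← hkn] at hfold
    have harg : (PySem.List.pyRange 0 k 1).foldl (fun acc i => acc + ((L + 1) + (k - 1 - i))) 0
        = (PySem.List.pyRange 0 k 1).foldl (fun acc i => acc + ((L + k) - i)) 0 := by
      congr 1
      funext acc i
      ring
    obtain ⟨j, hj⟩ : ∃ j : Int, k * (k + 7) = 2 * j := by
      rcases Int.even_or_odd k with ⟨t, ht⟩ | ⟨t, ht⟩
      · exact ⟨t * (k + 7), by rw [ht]; ring⟩
      · exact ⟨k * (t + 4), by rw [ht]; ring⟩
    have hdiv : PySem.Int.floordiv (k * (k + 7)) 2 = j := by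
      rw [hj]; simp [PySem.Int.floordiv, Int.mul_fdiv_cancel_left _ (by norm_num : (2:Int) ≠ 0)]
    rw [harg, hdiv]
    nlinarith [hfold, hmul, hj]
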